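-- pv_equiv track=rewrite | github.com/m-prezes/Pathfinding3D | Pathfinding3D/utils.py | ngb_from_maze
-- ===== SOURCE A (Python) =====
-- def ngb_from_maze(maze, n):
--     ngb = [[] for _ in range(n * n * n)]
--
--     for i in range(n * n * n):
--         x, y, z = v_to_xyz(i, n)
--         if maze[x][y][z] == "#":
--             continue
--         else:
--             temp = i % (n * n)
--             if temp % n == n - 1:
--                 continue
--             else:
--                 x, y, z = v_to_xyz(i + 1, n)
--                 if maze[x][y][z] == "#":
--                     continue
--                 else:
--                     ngb[i].append(i + 1)
--                     ngb[i + 1].append(i)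
--
--     for i in range(n * n * n):
--         x, y, z = v_to_xyz(i, n)
--         if maze[x][y][z] == "#":
--             continue
--         else:
--             temp = i % (n * n)
--             temp = temp // n
--             if temp % n == n - 1:
--                 continue
--             else:
--                 x, y, z = v_to_xyz(i + n, n)
--                 if maze[x][y][z] == "#":
--                     continue
--                 else:
--                     ngb[i].append(i + n)
--                     ngb[i + n].append(i)
--
--     for i in range(n * n * n - n * n):
--         x, y, z = v_to_xyz(i, n)
--         if maze[x][y][z] == "#":
--             continue
--         else:
--             x, y, z = v_to_xyz(i + n * n, n)
--             if maze[x][y][z] == "#":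
--                 continue
--             else:
--                 ngb[i].append(i + n * n)
--                 ngb[i + n * n].append(i)
--
--     return ngb
--
-- def v_to_xyz(v, n):
--     z = v // (n * n)
--     temp = v % (n * n)
--     y = temp // n
--     x = temp % n
--     return x, y, z
-- ===== SOURCE B (Python) =====
-- def ngb_from_maze(maze, n):
--     nn = n * n
--
--     def is_wall(v):
--         return maze[v % n][v // n % n][v // nn] == "#"
--
--     ngb = []
--     for i in range(n * nn):
--         if is_wall(i):
--             ngb.append([])
--             continue
--         x, y, z = i % n, i // n % n, i // nn
--         row = []
--         for ok, j in (
--             (x > 0, i - 1),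
--             (x < n - 1, i + 1),
--             (y > 0, i - n),
--             (y < n - 1, i + n),
--             (z > 0, i - nn),
--             (z < n - 1, i + nn),
--         ):
--             if ok and not is_wall(j):
--                 row.append(j)
--         ngb.append(row)
--     return ngb
-- ===== Notes on version B (the rewrite author's own statement) =====
-- stated objective: simpler
-- what changed: A enumerates edges in three separate passes over the whole grid, mutating two adjacency lists per edge; B makes one vertex-centric pass that builds each cell's neighbour list directly from its six candidate neighbours (in A's order i-1, i+1, i-n, i+n, i-n^2, i+n^2), appending rows front-to-back instead of updating a preallocated table.
import Mathlib
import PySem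

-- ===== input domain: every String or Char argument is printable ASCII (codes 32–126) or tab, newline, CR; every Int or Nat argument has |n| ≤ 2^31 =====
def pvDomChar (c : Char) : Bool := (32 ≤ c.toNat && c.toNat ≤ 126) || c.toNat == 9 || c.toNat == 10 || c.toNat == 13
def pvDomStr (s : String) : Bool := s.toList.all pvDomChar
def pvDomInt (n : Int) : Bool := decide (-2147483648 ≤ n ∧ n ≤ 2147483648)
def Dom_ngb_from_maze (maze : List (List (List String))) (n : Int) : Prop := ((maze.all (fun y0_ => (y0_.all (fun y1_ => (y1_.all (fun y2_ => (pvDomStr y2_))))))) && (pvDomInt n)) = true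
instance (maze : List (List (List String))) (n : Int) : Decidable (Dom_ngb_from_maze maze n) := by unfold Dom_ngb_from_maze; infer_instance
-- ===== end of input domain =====

-- B replaces A's three edge-enumeration passes (mutating two lists per edge) by one
-- vertex-centric pass building each cell's neighbour row directly; objective: simpler.


-- ===== PORT A =====
def v_to_xyz (v n : Int) : Int × Int × Int :=
  let z := PySem.Int.floordiv v (n * n)
  let temp := PySem.Int.mod v (n * n)
  let y := PySem.Int.floordiv temp n
  let x := PySem.Int.mod temp n
  (x, y, z)

-- maze[x][y][z]; getD with defaults is exact here: under Pre_ every access A performs is in range,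
-- and all indices are nonnegative (they are mods/divs of nonnegative values by positive n).
def cellA (maze : List (List (List String))) (n v : Int) : String :=
  match v_to_xyz v n with
  | (x, y, z) => PySem.List.pyGetD (PySem.List.pyGetD (PySem.List.pyGetD maze x []) y []) z ""

def ngb_from_maze (maze : List (List (List String))) (n : Int) : List (List Int) :=
  let ngb0 : List (List Int) := List.replicate (n * n * n).toNat []
  -- for i in range(n*n*n): x-direction edges   (i ≥ 0, so .toNat on the modified index is exact)
  let p1 := (PySem.List.pyRange 0 (n * n * n) 1).foldl (fun ngb i =>
    if cellA maze n i == "#" then ngb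
    else if PySem.Int.mod (PySem.Int.mod i (n * n)) n == n - 1 then ngb
    else if cellA maze n (i + 1) == "#" then ngb
    else (ngb.modify i.toNat (· ++ [i + 1])).modify (i + 1).toNat (· ++ [i])) ngb0
  -- for i in range(n*n*n): y-direction edges
  let p2 := (PySem.List.pyRange 0 (n * n * n) 1).foldl (fun ngb i =>
    if cellA maze n i == "#" then ngb
    else if PySem.Int.mod (PySem.Int.floordiv (PySem.Int.mod i (n * n)) n) n == n - 1 then ngb
    else if cellA maze n (i + n) == "#" then ngb
    else (ngb.modify i.toNat (· ++ [i + n])).modify (i + n).toNat (· ++ [i])) p1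
  -- for i in range(n*n*n - n*n): z-direction edges
  let p3 := (PySem.List.pyRange 0 (n * n * n - n * n) 1).foldl (fun ngb i =>
    if cellA maze n i == "#" then ngb
    else if cellA maze n (i + n * n) == "#" then ngb
    else (ngb.modify i.toNat (· ++ [i + n * n])).modify (i + n * n).toNat (· ++ [i])) p2
  p3

-- ===== PORT B =====
-- is_wall(v) = maze[v % n][v // n % n][v // nn] == "#"
def cellB (maze : List (List (List String))) (n v : Int) : String :=
  PySem.List.pyGetD
    (PySem.List.pyGetD
      (PySem.List.pyGetD maze (PySem.Int.mod v n) [])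
      (PySem.Int.mod (PySem.Int.floordiv v n) n) [])
    (PySem.Int.floordiv v (n * n)) ""

def ngb_from_maze_alt (maze : List (List (List String))) (n : Int) : List (List Int) :=
  let nn := n * n
  (PySem.List.pyRange 0 (n * nn) 1).foldl (fun ngb i =>
    if cellB maze n i == "#" then ngb ++ [[]]
    else
      let x := PySem.Int.mod i n
      let y := PySem.Int.mod (PySem.Int.floordiv i n) n
      let z := PySem.Int.floordiv i nn
      -- the inner for-loop over the literal 6-tuple of (ok, j) candidates
      let row := [(decide (0 < x), i - 1), (decide (x < n - 1), i + 1),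
                  (decide (0 < y), i - n), (decide (y < n - 1), i + n),
                  (decide (0 < z), i - nn), (decide (z < n - 1), i + nn)].foldl
        (fun row p => if p.1 && !(cellB maze n p.2 == "#") then row ++ [p.2] else row)
        ([] : List Int)
      ngb ++ [row]) []

-- ===== PRECONDITION & SPEC =====
-- Pre_ = exactly the inputs where A returns: n ≤ 0 (all loops empty), or maze contains an
-- n×n×n grid (A reads maze[x][y][z] for every x,y,z in [0,n), so any smaller shape raises IndexError).
def Pre_ngb_from_maze (maze : List (List (List String))) (n : Int) : Prop :=
  n ≤ 0 ∨ (n.toNat ≤ maze.length ∧ ∀ p ∈ maze.take n.toNat,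
            n.toNat ≤ p.length ∧ ∀ r ∈ p.take n.toNat, n.toNat ≤ r.length)
instance (maze : List (List (List String))) (n : Int) : Decidable (Pre_ngb_from_maze maze n) := by
  unfold Pre_ngb_from_maze; infer_instance

def pvWitness_ngb_from_maze : List (List (List String)) × Int := ([[["."]]], 1)

def Spec_ngb_from_maze (maze : List (List (List String))) (n : Int) (out : List (List Int)) : Prop := out = ngb_from_maze_alt maze n
instance (maze : List (List (List String))) (n : Int) (out : List (List Int)) : Decidable (Spec_ngb_from_maze maze n out) := by unfold Spec_ngb_from_maze; infer_instance

-- ===== CLAIM (what is proved, stated in full; the proofs are below) =====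
def Claim_equal_ngb_from_maze : Prop := ∀ (maze : List (List (List String))) (n : Int), Dom_ngb_from_maze maze n → Pre_ngb_from_maze maze n → Spec_ngb_from_maze maze n (ngb_from_maze maze n)

-- ===== LEMMAS AND PROOFS =====


def pvStep (g : Nat → Bool) (d : Nat) (acc : List (List Int)) (k : Nat) : List (List Int) :=
  if g k then (acc.modify k (· ++ [(k : Int) + (d : Int)])).modify (k + d) (· ++ [(k : Int)]) else acc

lemma pvStep_getElem? (g : Nat → Bool) (d : Nat) (hd : 0 < d) (acc : List (List Int)) (j k : Nat) :
    (pvStep g d acc j)[k]? =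
      (acc[k]?).map (fun a =>
        (a ++ (if g j = true ∧ j = k then [(j : Int) + (d : Int)] else []))
          ++ (if g j = true ∧ j + d = k then [(j : Int)] else [])) := by
  unfold pvStep
  by_cases hg : g j = true
  · simp only [hg, if_pos]
    rw [List.getElem?_modify, List.getElem?_modify]
    rcases h : acc[k]? with _ | l
    · simp
    · simp only [Option.map_some, Option.map_map, Function.comp]
      congr 1
      split_ifs <;> simp_all <;> omega
  · simp only [hg]
    rcases h : acc[k]? with _ | l <;> simp_all

lemma pvPass_getElem? (g : Nat → Bool) (d : Nat) (hd : 0 < d) :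
    ∀ (m : Nat) (acc : List (List Int)) (k : Nat),
    ((List.range m).foldl (pvStep g d) acc)[k]? =
      (acc[k]?).map (fun l =>
        (l ++ (if d ≤ k ∧ k - d < m ∧ g (k - d) = true then [((k : Int) - (d : Int))] else []))
          ++ (if k < m ∧ g k = true then [((k : Int) + (d : Int))] else [])) := by
  intro m
  induction m with
  | zero =>
      intro acc k
      rcases h : acc[k]? with _ | l <;> simp [h]
  | succ m ih =>
      intro acc k
      rw [List.range_succ, List.foldl_append]
      simp only [List.foldl_cons, List.foldl_nil]
      rw [pvStep_getElem? g d hd, ih]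
      rcases h : acc[k]? with _ | l
      · simp
      · simp only [Option.map_some, Option.map_map, Function.comp_def]
        clear h
        congr 1
        by_cases hg : g m = true
        · by_cases hk1 : m = k
          · subst hk1
            have h1 : g m = true ∧ m = m := ⟨hg, rfl⟩
            have h2 : ¬(g m = true ∧ m + d = m) := by rintro ⟨-, h⟩; omega
            have h3 : ¬(m < m ∧ g m = true) := by rintro ⟨h, -⟩; omega
            have h4 : m < m + 1 ∧ g m = true := ⟨Nat.lt_succ_self m, hg⟩
            have h5 : (d ≤ m ∧ m - d < m ∧ g (m - d) = true) ↔
                (d ≤ m ∧ m - d < m + 1 ∧ g (m - d) = true) :=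
              ⟨fun ⟨a, b, c⟩ => ⟨a, by omega, c⟩, fun ⟨a, _, c⟩ => ⟨a, by omega, c⟩⟩
            simp only [if_pos h1, if_neg h2, if_neg h3, if_pos h4, h5]
            push_cast
            simp [hg]
          · by_cases hk2 : m + d = k
            · have h1 : ¬(g m = true ∧ m = k) := by rintro ⟨-, h⟩; exact hk1 h
              have h2 : g m = true ∧ m + d = k := ⟨hg, hk2⟩
              have h3 : ¬(k < m ∧ g k = true) := by rintro ⟨h, -⟩; omega
              have h4 : ¬(k < m + 1 ∧ g k = true) := by rintro ⟨h, -⟩; omega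
              have h5 : ¬(d ≤ k ∧ k - d < m ∧ g (k - d) = true) := by rintro ⟨-, h, -⟩; omega
              have h6 : d ≤ k ∧ k - d < m + 1 ∧ g (k - d) = true :=
                ⟨by omega, by omega, by rwa [show k - d = m by omega]⟩
              have h7 : ((m : Int)) = (k : Int) - (d : Int) := by omega
              simp only [if_neg h1, if_pos h2, if_neg h3, if_neg h4, if_neg h5, if_pos h6, h7]
              simp
            · have h1 : ¬(g m = true ∧ m = k) := by rintro ⟨-, h⟩; exact hk1 h
              have h2 : ¬(g m = true ∧ m + d = k) := by rintro ⟨-, h⟩; exact hk2 h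
              have h5 : (d ≤ k ∧ k - d < m ∧ g (k - d) = true) ↔
                  (d ≤ k ∧ k - d < m + 1 ∧ g (k - d) = true) :=
                ⟨fun ⟨a, b, c⟩ => ⟨a, by omega, c⟩, fun ⟨a, b, c⟩ => ⟨a, by omega, c⟩⟩
              have h6 : (k < m ∧ g k = true) ↔ (k < m + 1 ∧ g k = true) :=
                ⟨fun ⟨a, c⟩ => ⟨by omega, c⟩, fun ⟨a, c⟩ => ⟨by omega, c⟩⟩
              simp only [if_neg h1, if_neg h2, h5, h6]
              simp
        · have h1 : ¬(g m = true ∧ m = k) := by rintro ⟨h, -⟩; exact hg h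
          have h2 : ¬(g m = true ∧ m + d = k) := by rintro ⟨h, -⟩; exact hg h
          have h5 : (d ≤ k ∧ k - d < m ∧ g (k - d) = true) ↔
              (d ≤ k ∧ k - d < m + 1 ∧ g (k - d) = true) := by
            constructor
            · rintro ⟨a, b, c⟩; exact ⟨a, by omega, c⟩
            · rintro ⟨a, b, c⟩
              refine ⟨a, ?_, c⟩
              rcases Nat.lt_succ_iff_lt_or_eq.mp b with h | h
              · exact h
              · exact absurd (by rwa [h] at c) hg
          have h6 : (k < m ∧ g k = true) ↔ (k < m + 1 ∧ g k = true) := by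
            constructor
            · rintro ⟨a, c⟩; exact ⟨by omega, c⟩
            · rintro ⟨a, c⟩
              refine ⟨?_, c⟩
              rcases Nat.lt_succ_iff_lt_or_eq.mp a with h | h
              · exact h
              · exact absurd (by rwa [h] at c) hg
          simp only [if_neg h1, if_neg h2, h5, h6]
          simp

lemma pvFoldl_fun_congr {α β : Type} (f g : α → β → α) (h : ∀ a b, f a b = g a b)
    (l : List β) : ∀ (init : α), List.foldl f init l = List.foldl g init l := by
  induction l with
  | nil => intro init; rfl
  | cons x xs ih => intro init; simp only [List.foldl_cons, h]; exact ih _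

def pvG1 (maze : List (List (List String))) (n : Int) (k : Nat) : Bool :=
  !(cellA maze n ↑k == "#") &&
  !(PySem.Int.mod (PySem.Int.mod ↑k (n * n)) n == n - 1) &&
  !(cellA maze n (↑k + 1) == "#")

def pvG2 (maze : List (List (List String))) (n : Int) (k : Nat) : Bool :=
  !(cellA maze n ↑k == "#") &&
  !(PySem.Int.mod (PySem.Int.floordiv (PySem.Int.mod ↑k (n * n)) n) n == n - 1) &&
  !(cellA maze n (↑k + n) == "#")

def pvG3 (maze : List (List (List String))) (n : Int) (k : Nat) : Bool :=
  !(cellA maze n ↑k == "#") && !(cellA maze n (↑k + n * n) == "#")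

lemma A_as_passes (maze : List (List (List String))) (Nn : Nat) :
    ngb_from_maze maze (Nn : Int) =
      (List.range (Nn * Nn * Nn - Nn * Nn)).foldl (pvStep (pvG3 maze ↑Nn) (Nn * Nn))
        ((List.range (Nn * Nn * Nn)).foldl (pvStep (pvG2 maze ↑Nn) Nn)
          ((List.range (Nn * Nn * Nn)).foldl (pvStep (pvG1 maze ↑Nn) 1)
            (List.replicate (Nn * Nn * Nn) []))) := by
  have e1 : ((Nn : Int) * Nn * Nn) = ((Nn * Nn * Nn : Nat) : Int) := by push_cast; ring
  have e3 : ((Nn : Int) * Nn * Nn - Nn * Nn - 0).toNat = Nn * Nn * Nn - Nn * Nn := by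
    push_cast; omega
  have e4 : ((Nn : Int) * Nn * Nn - 0).toNat = Nn * Nn * Nn := by push_cast; omega
  unfold ngb_from_maze
  dsimp only
  rw [PySem.List.pyRange_one, PySem.List.pyRange_one,
      List.foldl_map, List.foldl_map, List.foldl_map, e3, e4]
  congr 1
  · funext acc k
    simp only [zero_add]
    unfold pvStep pvG3
    by_cases c1 : cellA maze ↑Nn ↑k == "#"
    · simp [c1]
    · by_cases c2 : cellA maze ↑Nn ((k : Int) + ↑Nn * ↑Nn) == "#"
      · simp [c1, c2, show ((k : Int) + ↑Nn * ↑Nn).toNat = k + Nn * Nn by push_cast; omega]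
      · simp [c1, c2, show ((k : Int) + ↑Nn * ↑Nn).toNat = k + Nn * Nn by push_cast; omega]
  · congr 1
    · funext acc k
      simp only [zero_add]
      unfold pvStep pvG2
      by_cases c1 : cellA maze ↑Nn ↑k == "#"
      · simp [c1]
      · by_cases c2 : PySem.Int.mod (PySem.Int.floordiv (PySem.Int.mod (k : Int) (↑Nn * ↑Nn)) ↑Nn) ↑Nn == ↑Nn - 1
        · simp [c1, c2]
        · by_cases c3 : cellA maze ↑Nn ((k : Int) + ↑Nn) == "#"
          · simp [c1, c2, c3, show ((k : Int) + ↑Nn).toNat = k + Nn by push_cast; omega]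
          · simp [c1, c2, c3, show ((k : Int) + ↑Nn).toNat = k + Nn by push_cast; omega]
    · congr 1
      · funext acc k
        simp only [zero_add]
        unfold pvStep pvG1
        by_cases c1 : cellA maze ↑Nn ↑k == "#"
        · simp [c1]
        · by_cases c2 : PySem.Int.mod (PySem.Int.mod (k : Int) (↑Nn * ↑Nn)) ↑Nn == ↑Nn - 1
          · simp [c1, c2]
          · by_cases c3 : cellA maze ↑Nn ((k : Int) + 1) == "#"
            · simp [c1, c2, c3, show ((k : Int) + 1).toNat = k + 1 by omega]
            · simp [c1, c2, c3, show ((k : Int) + 1).toNat = k + 1 by omega]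

def pvEntryB (maze : List (List (List String))) (n : Int) (k : Nat) : List Int :=
  if cellB maze n ↑k == "#" then []
  else
    (if (decide (0 < PySem.Int.mod ↑k n) && !(cellB maze n ((k : Int) - 1) == "#")) = true
        then [(k : Int) - 1] else []) ++
    ((if (decide (PySem.Int.mod ↑k n < n - 1) && !(cellB maze n ((k : Int) + 1) == "#")) = true
        then [(k : Int) + 1] else []) ++
    ((if (decide (0 < PySem.Int.mod (PySem.Int.floordiv ↑k n) n) && !(cellB maze n ((k : Int) - n) == "#")) = true
        then [(k : Int) - n] else []) ++
    ((if (decide (PySem.Int.mod (PySem.Int.floordiv ↑k n) n < n - 1) && !(cellB maze n ((k : Int) + n) == "#")) = true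
        then [(k : Int) + n] else []) ++
    ((if (decide (0 < PySem.Int.floordiv ↑k (n * n)) && !(cellB maze n ((k : Int) - n * n) == "#")) = true
        then [(k : Int) - n * n] else []) ++
    (if (decide (PySem.Int.floordiv ↑k (n * n) < n - 1) && !(cellB maze n ((k : Int) + n * n) == "#")) = true
        then [(k : Int) + n * n] else [])))))

lemma pvIteSnoc {α : Type} (c : Prop) [inst : Decidable c] (r : List α) (x : α) :
    (if c then r ++ [x] else r) = r ++ (if c then [x] else []) := by split_ifs <;> simp

lemma pvFoldl_snoc {α β : Type} (f : β → List α) (l : List β) :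
    ∀ (init : List (List α)), l.foldl (fun acc x => acc ++ [f x]) init = init ++ l.map (f ·) := by
  induction l with
  | nil => intro init; simp
  | cons x xs ih => intro init; simp only [List.foldl_cons, List.map_cons, ih]; simp

lemma B_as_map (maze : List (List (List String))) (Nn : Nat) :
    ngb_from_maze_alt maze (Nn : Int) =
      (List.range (Nn * Nn * Nn)).map (pvEntryB maze ↑Nn) := by
  have e4 : ((Nn : Int) * (↑Nn * ↑Nn) - 0).toNat = Nn * Nn * Nn := by
    rw [show ((Nn : Int) * (↑Nn * ↑Nn) - 0) = ((Nn * Nn * Nn : Nat) : Int) by push_cast; ring,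
        Int.toNat_natCast]
  unfold ngb_from_maze_alt
  dsimp only
  rw [PySem.List.pyRange_one, List.foldl_map, e4]
  rw [pvFoldl_fun_congr _ (fun acc k => acc ++ [pvEntryB maze ↑Nn k]) ?_ _ []]
  · rw [pvFoldl_snoc]
    simp
  · intro acc k
    simp only [zero_add]
    unfold pvEntryB
    by_cases c0 : cellB maze ↑Nn ↑k == "#"
    · simp [c0]
    · rw [if_neg (by simp [c0]), if_neg (by simp [c0])]
      simp only [List.foldl_cons, List.foldl_nil]
      congr 1
      simp only [pvIteSnoc, List.nil_append]
      simp [List.append_assoc]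

lemma pvPredMod (Nn k : Nat) (h : 0 < Nn) (hk : 0 < k) :
    ((k - 1) % Nn = Nn - 1 ↔ k % Nn = 0) := by
  by_cases h1 : Nn = 1
  · subst h1; simp [Nat.mod_one]
  · have h2 : 1 < Nn := by omega
    have ha : k % Nn = ((k - 1) % Nn + 1) % Nn := by
      conv_lhs => rw [show k = (k - 1) + 1 by omega]
      rw [Nat.add_mod, Nat.mod_eq_of_lt h2]
    have hb : (k - 1) % Nn < Nn := Nat.mod_lt _ h
    constructor
    · intro hc
      rw [ha, hc, show Nn - 1 + 1 = Nn by omega, Nat.mod_self]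
    · intro hc
      by_contra hne
      have hlt : (k - 1) % Nn + 1 < Nn := by omega
      rw [ha, Nat.mod_eq_of_lt hlt] at hc
      omega

lemma pvSubDiv (Nn k : Nat) (h : 0 < Nn) (hle : Nn ≤ k) : (k - Nn) / Nn = k / Nn - 1 := by
  have h2 := Nat.add_div_right (k - Nn) h
  rw [show k - Nn + Nn = k by omega] at h2
  rw [h2, Nat.add_sub_cancel]

lemma pvLeftIff (Nn K : Nat) (h : 0 < Nn) :
    (0 < K ∧ (K - 1) % Nn ≠ Nn - 1) ↔ 0 < K % Nn := by
  constructor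
  · rintro ⟨h1, h2⟩
    rcases Nat.eq_zero_or_pos (K % Nn) with h3 | h3
    · exact absurd ((pvPredMod Nn K h h1).mpr h3) h2
    · exact h3
  · intro h1
    have hK : 0 < K := by
      rcases Nat.eq_zero_or_pos K with h2 | h2
      · rw [h2] at h1; simp at h1
      · exact h2
    exact ⟨hK, fun hc => by have := (pvPredMod Nn K h hK).mp hc; omega⟩

lemma pvCoordX (Nn v : Nat) : v % (Nn * Nn) % Nn = v % Nn :=
  Nat.mod_mod_of_dvd v ⟨Nn, rfl⟩

lemma pvCoordY (Nn v : Nat) : v % (Nn * Nn) / Nn = v / Nn % Nn :=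
  Nat.mod_mul_right_div_self v Nn Nn

lemma pvCell_eq (maze : List (List (List String))) (Nn : Nat) (v : Nat) :
    cellB maze ↑Nn ↑v = cellA maze ↑Nn ↑v := by
  unfold cellA cellB v_to_xyz
  dsimp only
  rw [show ((Nn : Int) * ↑Nn) = ((Nn * Nn : Nat) : Int) by push_cast; ring]
  simp only [PySem.Int.mod_natCast, PySem.Int.floordiv_natCast]
  rw [pvCoordX, pvCoordY]

lemma pvEntry_eq (maze : List (List (List String))) (Nn k : Nat)
    (hNn : 0 < Nn) (hk : k < Nn * Nn * Nn) :
    (((((([] ++ if 1 ≤ k ∧ k - 1 < Nn * Nn * Nn ∧ pvG1 maze (↑Nn) (k - 1) = true then [(k : Int) - ((1 : Nat) : Int)] else []) ++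
              if k < Nn * Nn * Nn ∧ pvG1 maze (↑Nn) k = true then [(k : Int) + ((1 : Nat) : Int)] else []) ++
            if Nn ≤ k ∧ k - Nn < Nn * Nn * Nn ∧ pvG2 maze (↑Nn) (k - Nn) = true then [(k : Int) - (Nn : Int)] else []) ++
          if k < Nn * Nn * Nn ∧ pvG2 maze (↑Nn) k = true then [(k : Int) + (Nn : Int)] else []) ++
        if Nn * Nn ≤ k ∧ k - Nn * Nn < Nn * Nn * Nn - Nn * Nn ∧ pvG3 maze (↑Nn) (k - Nn * Nn) = true then
          [(k : Int) - ((Nn * Nn : Nat) : Int)]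
        else []) ++
      if k < Nn * Nn * Nn - Nn * Nn ∧ pvG3 maze (↑Nn) k = true then [(k : Int) + ((Nn * Nn : Nat) : Int)] else []) =
    pvEntryB maze (↑Nn) k := by
  have hcell : ∀ v : Nat, cellB maze ↑Nn ↑v = cellA maze ↑Nn ↑v := pvCell_eq maze Nn
  have hcast : ((Nn : Int) * ↑Nn) = ((Nn * Nn : Nat) : Int) := by push_cast; ring
  have hmm : k % Nn < Nn := Nat.mod_lt _ hNn
  have hmm2 : k / Nn % Nn < Nn := Nat.mod_lt _ hNn
  have hNN : 0 < Nn * Nn := Nat.mul_pos hNn hNn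
  have hM : Nn * Nn * Nn - Nn * Nn = (Nn - 1) * (Nn * Nn) := by
    rw [Nat.sub_mul, one_mul, mul_assoc]
  have hdiv : k / (Nn * Nn) < Nn - 1 ↔ k < (Nn - 1) * (Nn * Nn) := Nat.div_lt_iff_lt_mul hNN
  unfold pvEntryB pvG1 pvG2 pvG3
  simp only [hcast, PySem.Int.mod_natCast, PySem.Int.floordiv_natCast, Bool.and_eq_true,
    Bool.not_eq_true', decide_eq_true_iff, beq_eq_false_iff_ne, pvCoordX, pvCoordY,
    Nat.mod_mod_of_dvd _ (dvd_refl Nn)]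
  by_cases hw : cellA maze ↑Nn ↑k = "#"
  · have n1 : ¬(1 ≤ k ∧ k - 1 < Nn * Nn * Nn ∧
        (cellA maze ↑Nn ↑(k - 1) ≠ "#" ∧ ((((k - 1) % Nn : Nat) : Int) ≠ (Nn : Int) - 1)) ∧
        cellA maze (↑Nn) ((((k - 1) : Nat) : Int) + 1) ≠ "#") := by
      rintro ⟨h1, -, -, h3⟩
      exact h3 (by rw [show (((k - 1 : Nat) : Int) + 1) = (k : Int) by omega]; exact hw)
    have n2 : ¬(k < Nn * Nn * Nn ∧
        (cellA maze ↑Nn ↑k ≠ "#" ∧ (((k % Nn : Nat) : Int) ≠ (Nn : Int) - 1)) ∧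
        cellA maze (↑Nn) ((k : Int) + 1) ≠ "#") := by
      rintro ⟨-, ⟨hA, -⟩, -⟩; exact hA hw
    have n3 : ¬(Nn ≤ k ∧ k - Nn < Nn * Nn * Nn ∧
        (cellA maze ↑Nn ↑(k - Nn) ≠ "#" ∧ ((((k - Nn) / Nn % Nn : Nat) : Int) ≠ (Nn : Int) - 1)) ∧
        cellA maze (↑Nn) ((((k - Nn) : Nat) : Int) + (Nn : Int)) ≠ "#") := by
      rintro ⟨h1, -, -, h3⟩
      exact h3 (by rw [show (((k - Nn : Nat) : Int) + (Nn : Int)) = (k : Int) by omega]; exact hw)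
    have n4 : ¬(k < Nn * Nn * Nn ∧
        (cellA maze ↑Nn ↑k ≠ "#" ∧ (((k / Nn % Nn : Nat) : Int) ≠ (Nn : Int) - 1)) ∧
        cellA maze (↑Nn) ((k : Int) + (Nn : Int)) ≠ "#") := by
      rintro ⟨-, ⟨hA, -⟩, -⟩; exact hA hw
    have n5 : ¬(Nn * Nn ≤ k ∧ k - Nn * Nn < Nn * Nn * Nn - Nn * Nn ∧
        cellA maze ↑Nn ↑(k - Nn * Nn) ≠ "#" ∧
        cellA maze (↑Nn) ((((k - Nn * Nn) : Nat) : Int) + ((Nn * Nn : Nat) : Int)) ≠ "#") := by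
      rintro ⟨h1, -, -, h3⟩
      exact h3 (by rw [show (((k - Nn * Nn : Nat) : Int) + ((Nn * Nn : Nat) : Int)) = (k : Int) by omega]; exact hw)
    have n6 : ¬(k < Nn * Nn * Nn - Nn * Nn ∧ cellA maze ↑Nn ↑k ≠ "#" ∧
        cellA maze (↑Nn) ((k : Int) + ((Nn * Nn : Nat) : Int)) ≠ "#") := by
      rintro ⟨-, hA, -⟩; exact hA hw
    rw [if_neg n1, if_neg n2, if_neg n3, if_neg n4, if_neg n5, if_neg n6,
        if_pos (show (cellB maze ↑Nn ↑k == "#") = true by rw [hcell]; simp [hw])]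
    simp
  · have e1 : (if 1 ≤ k ∧ k - 1 < Nn * Nn * Nn ∧
          (cellA maze ↑Nn ↑(k - 1) ≠ "#" ∧ ((((k - 1) % Nn : Nat) : Int) ≠ (Nn : Int) - 1)) ∧
          cellA maze (↑Nn) ((((k - 1) : Nat) : Int) + 1) ≠ "#"
        then [(k : Int) - ((1 : Nat) : Int)] else []) =
        (if 0 < ((k % Nn : Nat) : Int) ∧ cellB maze (↑Nn) ((k : Int) - 1) ≠ "#"
        then [(k : Int) - 1] else []) := by
      refine if_congr ?_ (by norm_num) rfl
      constructor
      · rintro ⟨h1, -, ⟨hA, hB⟩, -⟩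
        have hb' : (k - 1) % Nn ≠ Nn - 1 := fun hEq => hB (by rw [hEq]; omega)
        have hx := (pvLeftIff Nn k hNn).mp ⟨h1, hb'⟩
        refine ⟨by exact_mod_cast hx, ?_⟩
        rw [show ((k : Int) - 1) = ((k - 1 : Nat) : Int) by omega, hcell]
        exact hA
      · rintro ⟨h1, h2⟩
        have hx : 0 < k % Nn := by exact_mod_cast h1
        obtain ⟨hkpos, hb'⟩ := (pvLeftIff Nn k hNn).mpr hx
        refine ⟨hkpos, by omega, ⟨?_, ?_⟩, ?_⟩
        · rw [← hcell, show ((k - 1 : Nat) : Int) = (k : Int) - 1 by omega]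
          exact h2
        · intro hEq; exact hb' (by omega)
        · rw [show (((k - 1 : Nat) : Int) + 1) = (k : Int) by omega]
          exact hw
    have e2 : (if k < Nn * Nn * Nn ∧
          (cellA maze ↑Nn ↑k ≠ "#" ∧ (((k % Nn : Nat) : Int) ≠ (Nn : Int) - 1)) ∧
          cellA maze (↑Nn) ((k : Int) + 1) ≠ "#"
        then [(k : Int) + ((1 : Nat) : Int)] else []) =
        (if ((k % Nn : Nat) : Int) < (Nn : Int) - 1 ∧ cellB maze (↑Nn) ((k : Int) + 1) ≠ "#"
        then [(k : Int) + 1] else []) := by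
      refine if_congr ?_ (by norm_num) rfl
      constructor
      · rintro ⟨-, ⟨-, hB⟩, hC⟩
        refine ⟨by omega, ?_⟩
        rw [show ((k : Int) + 1) = ((k + 1 : Nat) : Int) by omega, hcell]
        rw [show ((k : Int) + 1) = ((k + 1 : Nat) : Int) by omega] at hC
        exact hC
      · rintro ⟨h1, h2⟩
        refine ⟨hk, ⟨hw, by omega⟩, ?_⟩
        rw [show ((k : Int) + 1) = ((k + 1 : Nat) : Int) by omega]
        rw [show ((k : Int) + 1) = ((k + 1 : Nat) : Int) by omega, hcell] at h2
        exact h2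
    have e3 : (if Nn ≤ k ∧ k - Nn < Nn * Nn * Nn ∧
          (cellA maze ↑Nn ↑(k - Nn) ≠ "#" ∧ ((((k - Nn) / Nn % Nn : Nat) : Int) ≠ (Nn : Int) - 1)) ∧
          cellA maze (↑Nn) ((((k - Nn) : Nat) : Int) + (Nn : Int)) ≠ "#"
        then [(k : Int) - (Nn : Int)] else []) =
        (if 0 < ((k / Nn % Nn : Nat) : Int) ∧ cellB maze (↑Nn) ((k : Int) - (Nn : Int)) ≠ "#"
        then [(k : Int) - (Nn : Int)] else []) := by
      refine if_congr ?_ rfl rfl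
      constructor
      · rintro ⟨h1, -, ⟨hA, hB⟩, -⟩
        have hsub : (k - Nn) / Nn = k / Nn - 1 := pvSubDiv Nn k hNn h1
        have hKpos : 0 < k / Nn := (Nat.one_le_div_iff hNn).mpr h1
        have hb' : (k / Nn - 1) % Nn ≠ Nn - 1 := fun hEq => hB (by rw [hsub, hEq]; omega)
        have hy := (pvLeftIff Nn (k / Nn) hNn).mp ⟨hKpos, hb'⟩
        refine ⟨by exact_mod_cast hy, ?_⟩
        rw [show ((k : Int) - (Nn : Int)) = ((k - Nn : Nat) : Int) by omega, hcell]
        exact hA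
      · rintro ⟨h1, h2⟩
        have hy : 0 < k / Nn % Nn := by exact_mod_cast h1
        obtain ⟨hKpos, hb'⟩ := (pvLeftIff Nn (k / Nn) hNn).mpr hy
        have h1' : Nn ≤ k := (Nat.one_le_div_iff hNn).mp hKpos
        have hsub : (k - Nn) / Nn = k / Nn - 1 := pvSubDiv Nn k hNn h1'
        refine ⟨h1', by omega, ⟨?_, ?_⟩, ?_⟩
        · rw [← hcell, show ((k - Nn : Nat) : Int) = (k : Int) - (Nn : Int) by omega]
          exact h2
        · rw [hsub]; intro hEq; exact hb' (by omega)
        · rw [show (((k - Nn : Nat) : Int) + (Nn : Int)) = (k : Int) by omega]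
          exact hw
    have e4 : (if k < Nn * Nn * Nn ∧
          (cellA maze ↑Nn ↑k ≠ "#" ∧ (((k / Nn % Nn : Nat) : Int) ≠ (Nn : Int) - 1)) ∧
          cellA maze (↑Nn) ((k : Int) + (Nn : Int)) ≠ "#"
        then [(k : Int) + (Nn : Int)] else []) =
        (if ((k / Nn % Nn : Nat) : Int) < (Nn : Int) - 1 ∧ cellB maze (↑Nn) ((k : Int) + (Nn : Int)) ≠ "#"
        then [(k : Int) + (Nn : Int)] else []) := by
      refine if_congr ?_ rfl rfl
      constructor
      · rintro ⟨-, ⟨-, hB⟩, hC⟩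
        refine ⟨by omega, ?_⟩
        rw [show ((k : Int) + (Nn : Int)) = ((k + Nn : Nat) : Int) by omega, hcell]
        rw [show ((k : Int) + (Nn : Int)) = ((k + Nn : Nat) : Int) by omega] at hC
        exact hC
      · rintro ⟨h1, h2⟩
        refine ⟨hk, ⟨hw, by omega⟩, ?_⟩
        rw [show ((k : Int) + (Nn : Int)) = ((k + Nn : Nat) : Int) by omega]
        rw [show ((k : Int) + (Nn : Int)) = ((k + Nn : Nat) : Int) by omega, hcell] at h2
        exact h2
    have e5 : (if Nn * Nn ≤ k ∧ k - Nn * Nn < Nn * Nn * Nn - Nn * Nn ∧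
          cellA maze ↑Nn ↑(k - Nn * Nn) ≠ "#" ∧
          cellA maze (↑Nn) ((((k - Nn * Nn) : Nat) : Int) + ((Nn * Nn : Nat) : Int)) ≠ "#"
        then [(k : Int) - ((Nn * Nn : Nat) : Int)] else []) =
        (if 0 < ((k / (Nn * Nn) : Nat) : Int) ∧ cellB maze (↑Nn) ((k : Int) - ((Nn * Nn : Nat) : Int)) ≠ "#"
        then [(k : Int) - ((Nn * Nn : Nat) : Int)] else []) := by
      refine if_congr ?_ rfl rfl
      constructor
      · rintro ⟨h1, -, hA, -⟩
        have hz : 0 < k / (Nn * Nn) := (Nat.one_le_div_iff hNN).mpr h1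
        refine ⟨by exact_mod_cast hz, ?_⟩
        rw [show ((k : Int) - ((Nn * Nn : Nat) : Int)) = ((k - Nn * Nn : Nat) : Int) by omega, hcell]
        exact hA
      · rintro ⟨h1, h2⟩
        have hz : 0 < k / (Nn * Nn) := by exact_mod_cast h1
        have h1' : Nn * Nn ≤ k := (Nat.one_le_div_iff hNN).mp hz
        refine ⟨h1', by omega, ?_, ?_⟩
        · rw [← hcell, show ((k - Nn * Nn : Nat) : Int) = (k : Int) - ((Nn * Nn : Nat) : Int) by omega]
          exact h2
        · rw [show (((k - Nn * Nn : Nat) : Int) + ((Nn * Nn : Nat) : Int)) = (k : Int) by omega]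
          exact hw
    have e6 : (if k < Nn * Nn * Nn - Nn * Nn ∧ cellA maze ↑Nn ↑k ≠ "#" ∧
          cellA maze (↑Nn) ((k : Int) + ((Nn * Nn : Nat) : Int)) ≠ "#"
        then [(k : Int) + ((Nn * Nn : Nat) : Int)] else []) =
        (if ((k / (Nn * Nn) : Nat) : Int) < (Nn : Int) - 1 ∧ cellB maze (↑Nn) ((k : Int) + ((Nn * Nn : Nat) : Int)) ≠ "#"
        then [(k : Int) + ((Nn * Nn : Nat) : Int)] else []) := by
      refine if_congr ?_ rfl rfl
      constructor
      · rintro ⟨h1, -, hC⟩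
        have hz : k / (Nn * Nn) < Nn - 1 := hdiv.mpr (by omega)
        refine ⟨by omega, ?_⟩
        rw [show ((k : Int) + ((Nn * Nn : Nat) : Int)) = ((k + Nn * Nn : Nat) : Int) by omega, hcell]
        rw [show ((k : Int) + ((Nn * Nn : Nat) : Int)) = ((k + Nn * Nn : Nat) : Int) by omega] at hC
        exact hC
      · rintro ⟨h1, h2⟩
        have hz : k / (Nn * Nn) < Nn - 1 := by exact_mod_cast by omega
        have hlt : k < (Nn - 1) * (Nn * Nn) := hdiv.mp hz
        refine ⟨by omega, hw, ?_⟩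
        rw [show ((k : Int) + ((Nn * Nn : Nat) : Int)) = ((k + Nn * Nn : Nat) : Int) by omega]
        rw [show ((k : Int) + ((Nn * Nn : Nat) : Int)) = ((k + Nn * Nn : Nat) : Int) by omega, hcell] at h2
        exact h2
    rw [e1, e2, e3, e4, e5, e6,
        if_neg (show ¬((cellB maze ↑Nn ↑k == "#") = true) by rw [hcell]; simp [hw])]
    simp [List.append_assoc]

theorem pvMain (maze : List (List (List String))) (n : Int) :
    ngb_from_maze maze n = ngb_from_maze_alt maze n := by
  by_cases hn0 : n ≤ 0
  case pos =>
    have hn : n ≤ 0 := hn0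
    have h3 : n * n * n ≤ 0 := by nlinarith [mul_self_nonneg n]
    have h4 : n * (n * n) ≤ 0 := by nlinarith [mul_self_nonneg n]
    unfold ngb_from_maze ngb_from_maze_alt
    dsimp only
    have h5 : n * n * n - n * n ≤ 0 := by nlinarith [mul_self_nonneg n]
    rw [PySem.List.pyRange_one_eq_nil (by omega : n * n * n ≤ 0),
        PySem.List.pyRange_one_eq_nil (by omega : n * n * n - n * n ≤ 0),
        PySem.List.pyRange_one_eq_nil (by omega : n * (n * n) ≤ 0)]
    simp [show (n * n * n).toNat = 0 by omega]
  case neg =>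
    have hn : 0 < n := by omega
    obtain ⟨Nn, rfl⟩ : ∃ m : Nat, n = ↑m := ⟨n.toNat, (Int.toNat_of_nonneg hn.le).symm⟩
    have hNn : 0 < Nn := by exact_mod_cast hn
    rw [A_as_passes, B_as_map]
    apply List.ext_getElem?
    intro k
    rw [pvPass_getElem? _ _ (by positivity), pvPass_getElem? _ _ hNn,
        pvPass_getElem? _ _ Nat.one_pos, List.getElem?_replicate]
    by_cases hk : k < Nn * Nn * Nn
    · rw [if_pos hk, List.getElem?_map, List.getElem?_range hk]
      simp only [Option.map_some]
      congr 1
      exact pvEntry_eq maze Nn k hNn hk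
    · rw [if_neg hk]
      simp only [Option.map_none]
      symm
      apply List.getElem?_eq_none
      simp
      omega

-- ===== VERDICT (by name: the statement is the Claim_ definition above) =====
theorem ngb_from_maze_spec : Claim_equal_ngb_from_maze := by
  intro maze n _ _
  unfold Spec_ngb_from_maze
  exact pvMain maze n
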